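-- pv_equiv track=rewrite | github.com/gbaghdasaryan94/Kapan | HaykAmirjanyan/classroom/Recursive functions/rfhw6.py | func
-- ===== SOURCE A (Python) =====
-- def func(st,n):
--     st1 = ""
--     if n < len(st) - 1:
--         if st[n:n + 2].lower() == "pi":
--             st1 += "3.14" + func(st, n + 2)
--             return st1
--         else:
--             st1 += st[n:n + 1] + func(st,n + 1)
--             return st1
--     else:
--         st1 += st[n:]
--         return st1
-- ===== SOURCE B (Python) =====
-- def func(st, n):
--     s = st[n:]
--     low = s.lower()
--     parts = []
--     i = 0
--     while True:
--         j = low.find("pi", i)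
--         if j < 0:
--             parts.append(s[i:])
--             return "".join(parts)
--         parts.append(s[i:j])
--         parts.append("3.14")
--         i = j + 2
-- ===== Notes on version B (the rewrite author's own statement) =====
-- stated objective: alternative
-- what changed: A recursively rebuilds the string character by character with a two-char lookahead and O(n) string concatenations per step; B lowercases the suffix once and jumps between non-overlapping matches with str.find, collecting pieces and joining once.
-- outside the precondition, e.g. on func('Pi', -7): A returns 'P3.14', B returns '3.14'; on func('xpPIPxy', -4): A returns 'IPxxp3.14Pxy', B returns 'IPxy'
import Mathlib
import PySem

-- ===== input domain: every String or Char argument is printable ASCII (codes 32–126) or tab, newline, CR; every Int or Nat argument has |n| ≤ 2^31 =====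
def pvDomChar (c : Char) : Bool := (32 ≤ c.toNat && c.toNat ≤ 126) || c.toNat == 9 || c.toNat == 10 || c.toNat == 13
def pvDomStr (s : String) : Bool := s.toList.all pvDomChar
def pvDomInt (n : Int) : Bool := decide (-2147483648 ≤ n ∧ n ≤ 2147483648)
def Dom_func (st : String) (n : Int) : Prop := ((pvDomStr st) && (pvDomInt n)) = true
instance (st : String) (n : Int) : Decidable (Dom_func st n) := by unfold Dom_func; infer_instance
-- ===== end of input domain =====

-- B's objective: a different algorithm — one lowercase pass plus find-jumps between matches
-- and a single join, instead of A's char-by-char recursion with per-step concatenation.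

-- ===== PORT A =====
def func (st : String) (n : Int) : String :=
  if _h : n < (PySem.Str.len st : Int) - 1 then
    if PySem.Str.lower (PySem.Str.slice st (some n) (some (n + 2))) = "pi" then
      "3.14" ++ func st (n + 2)
    else
      PySem.Str.slice st (some n) (some (n + 1)) ++ func st (n + 1)
  else
    PySem.Str.slice st (some n) none
termination_by ((PySem.Str.len st : Int) - n).toNat
decreasing_by all_goals omega

-- ===== PORT B =====
-- (lemma the port's termination proof cites)
theorem pvFindFrom_bounds (low sub : List Char) (i : Nat) (h2 : sub.length = 2)
    (h : ¬ PySem.Chars.findFrom low sub (i : Int) none < 0) :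
    i ≤ (PySem.Chars.findFrom low sub (i : Int) none).toNat ∧
      (PySem.Chars.findFrom low sub (i : Int) none).toNat + 2 ≤ low.length := by
  by_cases hi : i ≤ low.length
  · have hne : PySem.Chars.findFrom low sub (i : Int) none ≠ -1 := by omega
    obtain ⟨h1, hpre, _⟩ := PySem.Chars.findFrom_natCast_spec low sub i hi hne
    have hlen := hpre.length_le
    simp [List.length_drop] at hlen
    omega
  · exfalso
    apply h
    simp [PySem.Chars.findFrom]
    omega

-- Python's loop variable i is always a nonnegative int (0, then j+2 with j ≥ 0), kept as Nat.
def pvLoop (s low : String) (i : Nat) (parts : List String) : String :=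
  let j := PySem.Str.findFrom low "pi" (i : Int) none
  if j < 0 then
    PySem.Str.join "" (parts ++ [PySem.Str.slice s (some (i : Int)) none])
  else
    pvLoop s low (j.toNat + 2) (parts ++ [PySem.Str.slice s (some (i : Int)) (some j), "3.14"])
termination_by low.toList.length + 2 - i
decreasing_by
  rename_i hj
  have hb := pvFindFrom_bounds low.toList "pi".toList i (by decide)
    (by simpa [PySem.Str.findFrom] using hj)
  simp only [PySem.Str.findFrom] at *
  omega

def func_alt (st : String) (n : Int) : String :=
  let s := PySem.Str.slice st (some n) none
  let low := PySem.Str.lower s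
  pvLoop s low 0 []

-- ===== PRECONDITION & SPEC =====
-- Pre_ excludes negative n, outside the natural starting-index domain: there A's stepwise
-- negative slicing rescans and duplicates parts of the string instead of processing st[n:].
def Pre_func (_st : String) (n : Int) : Prop := 0 ≤ n
instance (st : String) (n : Int) : Decidable (Pre_func st n) := by unfold Pre_func; infer_instance
def pvWitness_func : String × Int := ("piPEr pI", 0)

def Spec_func (st : String) (n : Int) (out : String) : Prop := out = func_alt st n
instance (st : String) (n : Int) (out : String) : Decidable (Spec_func st n out) := by unfold Spec_func; infer_instance

-- ===== CLAIM (what is proved, stated in full; the proofs are below) =====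
def Claim_equal_func : Prop := ∀ (st : String) (n : Int), Dom_func st n → Pre_func st n → Spec_func st n (func st n)

-- ===== LEMMAS AND PROOFS =====

-- the common specification: replace each non-overlapping, case-insensitive "pi" by "3.14"
def pvTr : List Char → List Char
  | a :: b :: rest =>
    if PySem.Chars.lowerChar a = 'p' ∧ PySem.Chars.lowerChar b = 'i' then
      '3' :: '.' :: '1' :: '4' :: pvTr rest
    else
      a :: pvTr (b :: rest)
  | s => s

theorem pvTr_short (l : List Char) (h : l.length ≤ 1) : pvTr l = l := by
  match l with
  | [] => rfl
  | [c] => rfl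
  | a :: b :: rest => simp at h

theorem pvTr_no_pi (t : List Char) (h : ¬ ['p', 'i'] <:+: PySem.Chars.lower t) : pvTr t = t := by
  fun_induction pvTr t with
  | case1 a b rest hc ih =>
    exfalso
    apply h
    exact (show ['p','i'] <+: PySem.Chars.lower (a::b::rest) from
      ⟨PySem.Chars.lower rest, by simp [PySem.Chars.lower, hc.1, hc.2]⟩).isInfix
  | case2 a b rest hc ih =>
    have h' : ¬ ['p', 'i'] <:+: PySem.Chars.lower (b :: rest) := fun hinf =>
      h (hinf.trans (show PySem.Chars.lower (b::rest) <:+: PySem.Chars.lower (a::b::rest) from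
        (List.suffix_cons _ _).isInfix))
    simp [ih h']
  | case3 s h1 =>
    match s, h1 with
    | [], _ => rfl
    | [c], _ => rfl
    | a :: b :: r, h1 => exact absurd rfl (fun hh => h1 a b r hh)

theorem pvTr_split (m : Nat) (t : List Char)
    (hmin : ∀ u < m, ¬ ['p', 'i'] <+: (PySem.Chars.lower t).drop u)
    (hpre : ['p', 'i'] <+: (PySem.Chars.lower t).drop m) :
    pvTr t = t.take m ++ ('3' :: '.' :: '1' :: '4' :: pvTr (t.drop (m + 2))) := by
  induction m generalizing t with
  | zero =>
    match t with
    | [] => simp [PySem.Chars.lower] at hpre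
    | [c] =>
      exfalso
      have := hpre.length_le
      simp [PySem.Chars.lower] at this
    | a :: b :: rest =>
      obtain ⟨u, hu⟩ := hpre
      simp [PySem.Chars.lower] at hu
      simp [pvTr, hu.1.symm, hu.2.1.symm]
  | succ m ih =>
    match t with
    | [] => simp [PySem.Chars.lower] at hpre
    | [c] =>
      exfalso
      have := hpre.length_le
      simp [PySem.Chars.lower] at this
    | a :: b :: rest =>
      have h0 : ¬ (PySem.Chars.lowerChar a = 'p' ∧ PySem.Chars.lowerChar b = 'i') := by
        intro hc
        exact hmin 0 (by omega) ⟨PySem.Chars.lower rest, by simp [PySem.Chars.lower, hc.1, hc.2]⟩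
      have hmin' : ∀ u < m, ¬ ['p', 'i'] <+: (PySem.Chars.lower (b :: rest)).drop u := by
        intro u hu
        have := hmin (u + 1) (by omega)
        simpa [PySem.Chars.lower] using this
      have hpre' : ['p', 'i'] <+: (PySem.Chars.lower (b :: rest)).drop m := by
        simpa [PySem.Chars.lower] using hpre
      simp [pvTr, h0, ih (b :: rest) hmin' hpre']

theorem func_toList_nat (st : String) (d k : Nat) (hd : st.toList.length ≤ k + d) :
    (func st (k : Int)).toList = pvTr (st.toList.drop k) := by
  have hL : (PySem.Str.len st : Int) = (st.toList.length : Int) := by simp [PySem.Str.len]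
  have hLL : st.toList.length = st.length := String.length_toList
  induction d generalizing k with
  | zero =>
    rw [func, dif_neg (by omega)]
    rw [List.drop_eq_nil_of_le (by omega)]
    simp [PySem.Str.toList_slice, PySem.Chars.slice_eq_listSlice]
    rw [List.drop_eq_nil_of_le (by omega)]
    rfl
  | succ d ih =>
    rw [func]
    by_cases hlt : (k : Int) < (PySem.Str.len st : Int) - 1
    · have hk2 : k + 2 ≤ st.toList.length := by omega
      have hlen : (st.toList.drop k).length = st.toList.length - k := by simp
      rcases hdk : st.toList.drop k with _ | ⟨a, _ | ⟨b, rest⟩⟩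
      · rw [hdk] at hlen; simp at hlen; omega
      · rw [hdk] at hlen; simp at hlen; omega
      have hcond : (PySem.Str.lower (PySem.Str.slice st (some (k:Int)) (some ((k:Int) + 2))) = "pi")
          ↔ (PySem.Chars.lowerChar a = 'p' ∧ PySem.Chars.lowerChar b = 'i') := by
        rw [← String.toList_inj]
        have hsl : (PySem.Str.slice st (some (k:Int)) (some ((k:Int) + 2))).toList = [a, b] := by
          simp [PySem.Str.toList_slice, PySem.Chars.slice_eq_listSlice]
          rw [show (k:Int) + 2 = ((k + 2 : Nat) : Int) by push_cast; ring]
          rw [PySem.List.slice_toNat st.toList (by omega) (by omega)]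
          simp [hdk, show ((k:Int) + 2).toNat - k = 2 from by omega]
        simp [PySem.Str.toList_lower, hsl, PySem.Chars.lower]
      rw [dif_pos hlt]
      have hrest : st.toList.drop (k + 2) = rest := by
        have h2 := List.drop_drop (i := 2) (j := k) (l := st.toList)
        rw [hdk] at h2
        simpa using h2.symm
      have hbrest : st.toList.drop (k + 1) = b :: rest := by
        have h1 := List.drop_drop (i := 1) (j := k) (l := st.toList)
        rw [hdk] at h1
        simpa using h1.symm
      by_cases hc : PySem.Chars.lowerChar a = 'p' ∧ PySem.Chars.lowerChar b = 'i'
      · rw [if_pos (hcond.mpr hc)]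
        have ih2 := ih (k + 2) (by omega)
        push_cast at ih2
        simp [ih2, pvTr, hc.1, hc.2, hrest]
      · rw [if_neg (fun h => hc (hcond.mp h))]
        have ih1 := ih (k + 1) (by omega)
        push_cast at ih1
        have hsl1 : (PySem.Str.slice st (some (k:Int)) (some ((k:Int) + 1))).toList = [a] := by
          simp [PySem.Str.toList_slice, PySem.Chars.slice_eq_listSlice]
          rw [show (k:Int) + 1 = ((k + 1 : Nat) : Int) by push_cast; ring]
          rw [PySem.List.slice_toNat st.toList (by omega) (by omega)]
          simp [hdk]
        simp [hsl1, ih1, hbrest, pvTr, hc]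
    · rw [dif_neg hlt]
      simp [PySem.Str.toList_slice, PySem.Chars.slice_eq_listSlice]
      rw [pvTr_short (st.toList.drop k) (by simp; omega)]

theorem pvJoin_nil (ls : List (List Char)) : PySem.Chars.join [] ls = ls.flatten := by
  unfold PySem.Chars.join List.intercalate
  induction ls with
  | nil => rfl
  | cons a t ih => cases t <;> simp_all [List.intersperse]

theorem pvLoop_toList_aux (s low : String)
    (hlow : low.toList = PySem.Chars.lower s.toList) (d : Nat) :
    ∀ (i : Nat) (parts : List String), i ≤ s.toList.length → s.toList.length - i ≤ d →
    (pvLoop s low i parts).toList = (parts.map String.toList).flatten ++ pvTr (s.toList.drop i) := by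
  have hlen : low.toList.length = s.toList.length := by rw [hlow]; simp [PySem.Chars.lower]
  have hlowdrop : ∀ i : Nat, PySem.Chars.lower (s.toList.drop i) = low.toList.drop i := by
    intro i
    rw [hlow]
    simp [PySem.Chars.lower, List.map_drop]
  induction d with
  | zero =>
    intro i parts hi hd
    have hieq : i = s.toList.length := by omega
    rw [pvLoop]
    have hff : PySem.Str.findFrom low "pi" (i : Int) none = -1 := by
      simp only [PySem.Str.findFrom]
      rw [PySem.Chars.findFrom_natCast low.toList "pi".toList i (by omega)]
      rw [List.drop_eq_nil_of_le (by omega)]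
      simp [PySem.Chars.find_eq_neg_one_iff]
    simp only [hff]
    rw [if_pos (by norm_num)]
    rw [PySem.Str.toList_join]
    have htr : pvTr (s.toList.drop i) = s.toList.drop i :=
      pvTr_no_pi _ (by rw [hlowdrop, List.drop_eq_nil_of_le (by omega)]; simp)
    simp [pvJoin_nil, htr, PySem.Str.toList_slice, PySem.Chars.slice_eq_listSlice]
  | succ d ih =>
    intro i parts hi hd
    rw [pvLoop]
    have hff : PySem.Str.findFrom low "pi" (i : Int) none
        = if PySem.Chars.find (low.toList.drop i) "pi".toList = -1 then -1
          else (i : Int) + PySem.Chars.find (low.toList.drop i) "pi".toList := by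
      simp only [PySem.Str.findFrom]
      exact PySem.Chars.findFrom_natCast low.toList "pi".toList i (by omega)
    by_cases h1 : PySem.Chars.find (low.toList.drop i) "pi".toList = -1
    · rw [hff, if_pos h1]
      rw [if_pos (by norm_num)]
      rw [PySem.Str.toList_join]
      have htr : pvTr (s.toList.drop i) = s.toList.drop i :=
        pvTr_no_pi _ (by rw [hlowdrop]; exact (PySem.Chars.find_eq_neg_one_iff _ _).mp h1)
      simp [pvJoin_nil, htr, PySem.Str.toList_slice, PySem.Chars.slice_eq_listSlice]
    · set r := PySem.Chars.find (low.toList.drop i) "pi".toList with hrdef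
      have hr0 : 0 ≤ r := by
        have := PySem.Chars.neg_one_le_find (low.toList.drop i) "pi".toList
        omega
      obtain ⟨hpre, hmin⟩ := PySem.Chars.find_spec (s := low.toList.drop i) (sub := "pi".toList) hr0
      have hple : r.toNat + 2 ≤ low.toList.length - i := by
        have h2 := hpre.length_le
        rw [show ("pi".toList).length = 2 from rfl] at h2
        simp only [List.length_drop] at h2
        omega
      rw [hff, if_neg h1]
      rw [if_neg (by omega)]
      have hto : ((i : Int) + r).toNat = i + r.toNat := by omega
      rw [hto]
      have hIH := ih (i + r.toNat + 2) (parts ++ [PySem.Str.slice s (some (i:Int)) (some ((i:Int) + r)), "3.14"])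
        (by omega) (by omega)
      rw [hIH]
      have hsl : (PySem.Str.slice s (some (i:Int)) (some ((i:Int) + r))).toList
          = (s.toList.drop i).take r.toNat := by
        simp [PySem.Str.toList_slice, PySem.Chars.slice_eq_listSlice]
        rw [PySem.List.slice_toNat s.toList (by omega) (by omega)]
        rw [hto]
        simp
      have hsplit := pvTr_split r.toNat (s.toList.drop i)
        (by
          intro u hu
          rw [hlowdrop]
          exact hmin u hu)
        (by
          rw [hlowdrop]
          exact hpre)
      rw [hsplit]
      rw [List.drop_drop]
      rw [show i + (r.toNat + 2) = i + r.toNat + 2 from by omega]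
      simp [hsl]

-- ===== VERDICT (by name: the statement is the Claim_ definition above) =====
theorem func_spec : Claim_equal_func := by
  intro st n _ hpre
  have hn : (0:Int) ≤ n := hpre
  unfold Spec_func
  rw [← String.toList_inj]
  have halt : func_alt st n = pvLoop (PySem.Str.slice st (some n) none)
      (PySem.Str.lower (PySem.Str.slice st (some n) none)) 0 [] := rfl
  have hsl : (PySem.Str.slice st (some n) none).toList = st.toList.drop n.toNat := by
    simp only [PySem.Str.toList_slice, PySem.Chars.slice_eq_listSlice]
    exact PySem.List.slice_from st.toList hn
  have hloop := pvLoop_toList_aux (PySem.Str.slice st (some n) none)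
      (PySem.Str.lower (PySem.Str.slice st (some n) none))
      (by simp [PySem.Str.toList_lower])
      (PySem.Str.slice st (some n) none).toList.length 0 []
      (by omega) (by omega)
  rw [halt, hloop]
  simp only [List.map_nil, List.flatten_nil, List.drop_zero, List.nil_append]
  rw [hsl]
  have hnn : ((n.toNat : Nat) : Int) = n := Int.toNat_of_nonneg hn
  conv_lhs => rw [← hnn]
  exact func_toList_nat st st.toList.length n.toNat (by omega)
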